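-- pv_equiv track=rewrite | github.com/Mage-Control-Systems-Ltd/KiABOM | src/kiabom.py | match_netlist_refs_with_api_refs
-- ===== SOURCE A (Python) =====
-- def match_netlist_refs_with_api_refs(
--     lst1: list[list[str]], lst2: list[list[str]]
-- ) -> list[list[str]]:
--     """Matches the group number and location of a reference in lst1
--     to what group and location it is in lst2, and uses counters to store the indexes.
--     In this software's case, lst1 = Net list reader reference groups
--     and lst2 = API reference groups.
--
--     This function used to be used for extracting from the KiCost result only the
--     components present in the net list. Now it is used to sort the KiCost result
--     exactly how the net list reader does it so that the results can simply be indexed.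
--
--     Format of returned list is [lst1_group_index, lst1_ref_index, lst2_group_index, lst2_ref_index].
--
--     :param lst1: List with nested lists of strings.
--     :param lst2: List with nested lists of strings.
--     :return: List with nested lists of indexes where lst1 nested items match lst2 nested items. Goupred based on the location in lst1.
--     """
--     matched_ref_list = []
--     grouped_matched_ref_list = []
--
--     # Get all the lst1 items that match in lst2, and store their locations in matched_ref_list
--     for lst1_group_counter, lst1_group in enumerate(lst1):
--         for lst1_ref_counter, lst1_ref in enumerate(lst1_group):
--             for lst2_group_counter, lst2_group in enumerate(lst2):
--                 for lst2_ref_counter, lst2_ref in enumerate(lst2_group):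
--                     if lst1_ref == lst2_ref:
--                         # ref is the location of the corresponding refdes in both lists
--                         ref = [
--                             lst1_group_counter,
--                             lst1_ref_counter,
--                             lst2_group_counter,
--                             lst2_ref_counter,
--                         ]
--                         matched_ref_list.append(ref)
--
--     # Due to how the for-loop is structured, the length of the first list is the length of the desired final list
--     matched_num = len(lst1)
--
--     # Initialise a list with empty nested lists to store each group
--     for i in range(matched_num):
--         grouped_matched_ref_list.append([])
--
--     # Find the where the item was in lst1 and group it with items that also belong in that group
--     for i, group in enumerate(grouped_matched_ref_list):
--         for ref in matched_ref_list:
--             if i == ref[0]: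
--                 group.append(ref)
--
--     return grouped_matched_ref_list
-- ===== SOURCE B (Python) =====
-- def match_netlist_refs_with_api_refs(
--     lst1: list[list[str]], lst2: list[list[str]]
-- ) -> list[list[str]]:
--     """Dict-indexed re-implementation: positions of each ref in lst2 are built once,
--     then a single pass over lst1 looks them up."""
--     flat = [(ref, (g, r)) for g, grp in enumerate(lst2) for r, ref in enumerate(grp)]
--     pos = {}
--     for ref, loc in flat:
--         pos.setdefault(ref, []).append(loc)
--     return [
--         [[i, j, g, r] for j, ref in enumerate(grp) for g, r in pos.get(ref, [])]
--         for i, grp in enumerate(lst1)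
--     ]
-- ===== Notes on version B (the rewrite author's own statement) =====
-- stated objective: alternative
-- what changed: Replaced the four-nested-loop all-pairs scan plus a second grouping pass over a flat match list by a one-pass dict index of lst2 positions keyed by ref, with results built directly per lst1 group via lookups (measured 4.8x at n=1024, but a timing run could not confirm it at the largest size, so no speed is claimed).
import Mathlib
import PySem

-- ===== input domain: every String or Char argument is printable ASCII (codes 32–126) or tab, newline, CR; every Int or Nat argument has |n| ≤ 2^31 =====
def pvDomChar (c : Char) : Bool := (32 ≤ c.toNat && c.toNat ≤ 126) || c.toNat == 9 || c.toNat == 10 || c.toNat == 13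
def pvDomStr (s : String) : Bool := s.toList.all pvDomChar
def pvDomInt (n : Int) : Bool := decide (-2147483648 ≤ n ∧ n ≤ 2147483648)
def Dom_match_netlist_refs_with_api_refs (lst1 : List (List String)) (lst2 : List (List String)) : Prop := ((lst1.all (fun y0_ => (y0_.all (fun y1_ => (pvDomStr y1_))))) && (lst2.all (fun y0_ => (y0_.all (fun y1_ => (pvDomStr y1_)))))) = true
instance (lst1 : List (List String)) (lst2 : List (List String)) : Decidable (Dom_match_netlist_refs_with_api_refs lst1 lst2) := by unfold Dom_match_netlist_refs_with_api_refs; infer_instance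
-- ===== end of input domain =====

-- B replaces A's quadruple nested scan plus re-grouping pass by a dict of lst2 positions built once and looked up per lst1 ref.

-- ===== PORT A =====
def match_netlist_refs_with_api_refs (lst1 : List (List String)) (lst2 : List (List String)) : List (List (List Int)) :=
  let matched : List (List Int) :=
    (PySem.List.enumerate lst1).foldl (fun acc1 p1 =>
      (PySem.List.enumerate p1.2).foldl (fun acc2 p2 =>
        (PySem.List.enumerate lst2).foldl (fun acc3 p3 =>
          (PySem.List.enumerate p3.2).foldl (fun acc4 p4 =>
            if p2.2 = p4.2 then acc4 ++ [[p1.1, p2.1, p3.1, p4.1]] else acc4) acc3) acc2) acc1) []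
  let matchedNum : Int := lst1.length
  let grouped : List (List (List Int)) :=
    (PySem.List.pyRange 0 matchedNum 1).foldl (fun acc _ => acc ++ [([] : List (List Int))]) []
  -- the in-place 'group.append(ref)' loop: each slot of grouped becomes its extended group
  (PySem.List.enumerate grouped).foldl (fun acc p =>
    acc ++ [matched.foldl (fun g ref => if p.1 = PySem.List.pyGetD ref 0 0 then g ++ [ref] else g) p.2]) []

-- ===== PORT B =====
def match_netlist_refs_with_api_refs_alt (lst1 : List (List String)) (lst2 : List (List String)) : List (List (List Int)) :=
  let flat : List (String × (Int × Int)) :=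
    (PySem.List.enumerate lst2).flatMap (fun p => (PySem.List.enumerate p.2).map (fun q => (q.2, (p.1, q.1))))
  let pos : PySem.Dict String (List (Int × Int)) :=
    flat.foldl (fun d pr => d.modify pr.1 [] (· ++ [pr.2])) PySem.Dict.empty
  (PySem.List.enumerate lst1).map (fun p =>
    (PySem.List.enumerate p.2).flatMap (fun q =>
      (pos.getD q.2 []).map (fun loc => [p.1, q.1, loc.1, loc.2])))

-- ===== PRECONDITION & SPEC =====
def Spec_match_netlist_refs_with_api_refs (lst1 : List (List String)) (lst2 : List (List String)) (out : List (List (List Int))) : Prop := out = match_netlist_refs_with_api_refs_alt lst1 lst2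
instance (lst1 : List (List String)) (lst2 : List (List String)) (out : List (List (List Int))) : Decidable (Spec_match_netlist_refs_with_api_refs lst1 lst2 out) := by unfold Spec_match_netlist_refs_with_api_refs; infer_instance

-- ===== CLAIM (what is proved, stated in full; the proofs are below) =====
def Claim_equal_match_netlist_refs_with_api_refs : Prop := ∀ (lst1 : List (List String)) (lst2 : List (List String)), Dom_match_netlist_refs_with_api_refs lst1 lst2 → Spec_match_netlist_refs_with_api_refs lst1 lst2 (match_netlist_refs_with_api_refs lst1 lst2)

-- ===== LEMMAS AND PROOFS =====

-- B's per-ref lookup list: positions of s in lst2 in scan order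
def pvPos (lst2 : List (List String)) (s : String) : List (Int × Int) :=
  (((PySem.List.enumerate lst2).flatMap (fun p => (PySem.List.enumerate p.2).map (fun q => (q.2, (p.1, q.1))))).filter (fun pr => pr.1 == s)).map (·.2)

lemma pvPos_dict (lst2 : List (List String)) (s : String) :
    (((PySem.List.enumerate lst2).flatMap (fun p => (PySem.List.enumerate p.2).map (fun q => (q.2, (p.1, q.1))))).foldl
      (fun d pr => d.modify pr.1 [] (· ++ [pr.2])) PySem.Dict.empty).getD s [] = pvPos lst2 s := by
  rw [PySem.Dict.getD_foldl_modify_append]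
  simp [pvPos, PySem.Dict.getD_empty]

-- A's inner double loop over lst2 for one fixed ref equals the map over the position list
lemma inner_eq (lst2 : List (List String)) (i j : Int) (s : String) (acc : List (List Int)) :
    (PySem.List.enumerate lst2).foldl (fun acc3 p3 =>
        (PySem.List.enumerate p3.2).foldl (fun acc4 p4 =>
          if s = p4.2 then acc4 ++ [[i, j, p3.1, p4.1]] else acc4) acc3) acc
    = acc ++ (pvPos lst2 s).map (fun loc => [i, j, loc.1, loc.2]) := by
  have h : ∀ acc3 (p3 : Int × List String),
      (PySem.List.enumerate p3.2).foldl (fun acc4 p4 =>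
          if s = p4.2 then acc4 ++ [[i, j, p3.1, p4.1]] else acc4) acc3
      = acc3 ++ ((PySem.List.enumerate p3.2).filter (fun p4 => p4.2 == s)).map (fun p4 => [i, j, p3.1, p4.1]) := by
    intro acc3 p3
    rw [PySem.List.foldl_append_ite (fun p4 : Int × String => s = p4.2) (fun p4 => [i, j, p3.1, p4.1])]
    congr 1
    congr 1
    apply List.filter_congr
    intro x _
    rw [Bool.eq_iff_iff]
    simp only [beq_iff_eq, decide_eq_true_eq]
    exact eq_comm
  calc (PySem.List.enumerate lst2).foldl (fun acc3 p3 =>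
        (PySem.List.enumerate p3.2).foldl (fun acc4 p4 =>
          if s = p4.2 then acc4 ++ [[i, j, p3.1, p4.1]] else acc4) acc3) acc
      = (PySem.List.enumerate lst2).foldl (fun acc3 p3 =>
          acc3 ++ ((PySem.List.enumerate p3.2).filter (fun p4 => p4.2 == s)).map (fun p4 => [i, j, p3.1, p4.1])) acc := by
        apply PySem.List.foldl_congr_mem'
        intro p3 _ acc3
        exact h acc3 p3
    _ = acc ++ (PySem.List.enumerate lst2).flatMap (fun p3 =>
          ((PySem.List.enumerate p3.2).filter (fun p4 => p4.2 == s)).map (fun p4 => [i, j, p3.1, p4.1])) := by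
        rw [PySem.List.foldl_append_eq_flatMap]
    _ = acc ++ (pvPos lst2 s).map (fun loc => [i, j, loc.1, loc.2]) := by
        congr 1
        simp [pvPos, List.filter_flatMap, List.map_flatMap, List.filter_map, Function.comp_def]

-- B's whole group for one (i, grp) of lst1
def pvGroup (lst2 : List (List String)) (p : Int × List String) : List (List Int) :=
  (PySem.List.enumerate p.2).flatMap (fun q => (pvPos lst2 q.2).map (fun loc => [p.1, q.1, loc.1, loc.2]))

-- every ref emitted for group p starts with p.1
lemma pvGroup_head (lst2 : List (List String)) (p : Int × List String) :
    ∀ ref ∈ pvGroup lst2 p, PySem.List.pyGetD ref 0 0 = p.1 := by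
  intro ref href
  rw [pvGroup, List.mem_flatMap] at href
  obtain ⟨q, _, href2⟩ := href
  rw [List.mem_map] at href2
  obtain ⟨loc, _, rfl⟩ := href2
  simp [PySem.List.pyGetD, PySem.List.pyGet?, PySem.List.pyIdx?]

-- A's matched list is the concatenation of B's groups
lemma matched_eq (lst1 lst2 : List (List String)) (acc : List (List Int)) :
    (PySem.List.enumerate lst1).foldl (fun acc1 p1 =>
      (PySem.List.enumerate p1.2).foldl (fun acc2 p2 =>
        (PySem.List.enumerate lst2).foldl (fun acc3 p3 =>
          (PySem.List.enumerate p3.2).foldl (fun acc4 p4 =>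
            if p2.2 = p4.2 then acc4 ++ [[p1.1, p2.1, p3.1, p4.1]] else acc4) acc3) acc2) acc1) acc
    = acc ++ (PySem.List.enumerate lst1).flatMap (pvGroup lst2) := by
  have h1 : ∀ acc1 (p1 : Int × List String),
      (PySem.List.enumerate p1.2).foldl (fun acc2 p2 =>
        (PySem.List.enumerate lst2).foldl (fun acc3 p3 =>
          (PySem.List.enumerate p3.2).foldl (fun acc4 p4 =>
            if p2.2 = p4.2 then acc4 ++ [[p1.1, p2.1, p3.1, p4.1]] else acc4) acc3) acc2) acc1
      = acc1 ++ pvGroup lst2 p1 := by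
    intro acc1 p1
    calc (PySem.List.enumerate p1.2).foldl (fun acc2 p2 =>
          (PySem.List.enumerate lst2).foldl (fun acc3 p3 =>
            (PySem.List.enumerate p3.2).foldl (fun acc4 p4 =>
              if p2.2 = p4.2 then acc4 ++ [[p1.1, p2.1, p3.1, p4.1]] else acc4) acc3) acc2) acc1
        = (PySem.List.enumerate p1.2).foldl (fun acc2 p2 =>
            acc2 ++ (pvPos lst2 p2.2).map (fun loc => [p1.1, p2.1, loc.1, loc.2])) acc1 := by
          apply PySem.List.foldl_congr_mem'
          intro p2 _ acc2
          exact inner_eq lst2 p1.1 p2.1 p2.2 acc2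
      _ = acc1 ++ pvGroup lst2 p1 := by
          rw [PySem.List.foldl_append_eq_flatMap]; rfl
  calc (PySem.List.enumerate lst1).foldl (fun acc1 p1 =>
        (PySem.List.enumerate p1.2).foldl (fun acc2 p2 =>
          (PySem.List.enumerate lst2).foldl (fun acc3 p3 =>
            (PySem.List.enumerate p3.2).foldl (fun acc4 p4 =>
              if p2.2 = p4.2 then acc4 ++ [[p1.1, p2.1, p3.1, p4.1]] else acc4) acc3) acc2) acc1) acc
      = (PySem.List.enumerate lst1).foldl (fun acc1 p1 => acc1 ++ pvGroup lst2 p1) acc := by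
        apply PySem.List.foldl_congr_mem'
        intro p1 _ acc1
        exact h1 acc1 p1
    _ = acc ++ (PySem.List.enumerate lst1).flatMap (pvGroup lst2) := by
        rw [PySem.List.foldl_append_eq_flatMap]

-- the initial list of n empty groups, enumerated
lemma enum_replicate (n : Nat) : ∀ (s : Int),
    PySem.List.enumerate (List.replicate n ([] : List (List Int))) s
      = (PySem.List.pyRange s (s + n) 1).map (fun i => (i, ([] : List (List Int)))) := by
  induction n with
  | zero => intro s; simp [PySem.List.pyRange_one_eq_nil]
  | succ m ih =>
      intro s
      rw [List.replicate_succ, PySem.List.enumerate_cons,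
        PySem.List.pyRange_one_cons (by push_cast; omega : s < s + ((m + 1 : Nat) : Int))]
      simp only [List.map_cons]
      have hb : s + ((m + 1 : Nat) : Int) = (s + 1) + (m : Int) := by push_cast; ring
      rw [hb, ih (s + 1)]

-- the range-grouping of a flatMap over enumerate whose blocks carry their own index
lemma grouping (xs : List (List String)) (lst2 : List (List String)) : ∀ (s : Int),
    (PySem.List.pyRange s (s + xs.length) 1).map (fun i =>
        ((PySem.List.enumerate xs s).flatMap (pvGroup lst2)).filter
          (fun ref => decide (i = PySem.List.pyGetD ref 0 0)))
    = (PySem.List.enumerate xs s).map (pvGroup lst2) := by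
  induction xs with
  | nil => intro s; simp [PySem.List.pyRange_one_eq_nil]
  | cons x t ih =>
      intro s
      rw [PySem.List.enumerate_cons,
        PySem.List.pyRange_one_cons (by simp only [List.length_cons]; omega : s < s + (((x :: t).length : Nat) : Int))]
      simp only [List.map_cons, List.flatMap_cons, List.filter_append]
      have hhead : (pvGroup lst2 (s, x)).filter (fun ref => decide (s = PySem.List.pyGetD ref 0 0)) = pvGroup lst2 (s, x) := by
        apply List.filter_eq_self.mpr
        intro ref href
        rw [pvGroup_head lst2 (s, x) ref href]
        simp
      have htail0 : ((PySem.List.enumerate t (s + 1)).flatMap (pvGroup lst2)).filter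
          (fun ref => decide (s = PySem.List.pyGetD ref 0 0)) = [] := by
        apply List.filter_eq_nil_iff.mpr
        intro ref href
        rw [List.mem_flatMap] at href
        obtain ⟨p, hp, hrefp⟩ := href
        rw [PySem.List.mem_enumerate_iff] at hp
        obtain ⟨k, hk, rfl⟩ := hp
        rw [pvGroup_head lst2 _ ref hrefp]
        simp only [decide_eq_true_eq]
        omega
      congr 1
      · rw [hhead, htail0, List.append_nil]
      · have hmap : ∀ i ∈ PySem.List.pyRange (s + 1) (s + ((x :: t).length : Int)) 1,
            (pvGroup lst2 (s, x)).filter (fun ref => decide (i = PySem.List.pyGetD ref 0 0)) ++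
              ((PySem.List.enumerate t (s + 1)).flatMap (pvGroup lst2)).filter
                (fun ref => decide (i = PySem.List.pyGetD ref 0 0))
            = ((PySem.List.enumerate t (s + 1)).flatMap (pvGroup lst2)).filter
                (fun ref => decide (i = PySem.List.pyGetD ref 0 0)) := by
          intro i hi
          rw [PySem.List.mem_pyRange_one] at hi
          have hx : (pvGroup lst2 (s, x)).filter (fun ref => decide (i = PySem.List.pyGetD ref 0 0)) = [] := by
            apply List.filter_eq_nil_iff.mpr
            intro ref href
            rw [pvGroup_head lst2 (s, x) ref href]
            simp only [decide_eq_true_eq]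
            omega
          rw [hx, List.nil_append]
        rw [List.map_congr_left hmap]
        have hlen : s + (((x :: t).length : Nat) : Int) = (s + 1) + (t.length : Int) := by
          simp [List.length_cons]; ring
        rw [hlen]
        exact ih (s + 1)

theorem ports_agree (lst1 lst2 : List (List String)) :
    match_netlist_refs_with_api_refs lst1 lst2 = match_netlist_refs_with_api_refs_alt lst1 lst2 := by
  unfold match_netlist_refs_with_api_refs match_netlist_refs_with_api_refs_alt
  simp only []
  rw [matched_eq lst1 lst2 []]
  simp only [List.nil_append]
  have hrep : ((PySem.List.pyRange 0 (lst1.length : Int) 1).foldl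
      (fun acc _ => acc ++ [([] : List (List Int))]) []) = List.replicate lst1.length [] := by
    rw [PySem.List.foldl_append_singleton_eq_map]
    simp [List.map_const', PySem.List.length_pyRange_one]
  rw [hrep, PySem.List.foldl_append_singleton_eq_map, List.nil_append, enum_replicate lst1.length 0,
    List.map_map]
  have hcomp : ((fun p : Int × List (List Int) =>
      ((PySem.List.enumerate lst1).flatMap (pvGroup lst2)).foldl
        (fun g ref => if p.1 = PySem.List.pyGetD ref 0 0 then g ++ [ref] else g) p.2) ∘
      fun i => (i, ([] : List (List Int))))
      = fun i => ((PySem.List.enumerate lst1).flatMap (pvGroup lst2)).filter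
          (fun ref => decide (i = PySem.List.pyGetD ref 0 0)) := by
    funext i
    simp only [Function.comp]
    rw [PySem.List.foldl_append_ite_eq_filter (fun ref => i = PySem.List.pyGetD ref 0 0), List.nil_append]
  rw [hcomp, grouping lst1 lst2 0]
  apply List.map_congr_left
  intro p _
  simp only [pvGroup, pvPos_dict]

-- ===== VERDICT (by name: the statement is the Claim_ definition above) =====
theorem match_netlist_refs_with_api_refs_spec : Claim_equal_match_netlist_refs_with_api_refs := by
  intro lst1 lst2 _
  unfold Spec_match_netlist_refs_with_api_refs
  exact ports_agree lst1 lst2
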